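-- pv_equiv track=rewrite | github.com/Campus-Division-Smart-Technology-Team/AskAlfred | ingest_utils.py | _merge_aliases
-- ===== SOURCE A (Python) =====
-- MAX_ALIASES = 50
--
-- MAX_ALIAS_LEN = 120
--
-- def _merge_aliases(existing, incoming) -> list[str]:
--     out = []
--     seen = set()
--
--     def add(x: str):
--         x = (x or "").strip()
--         if not x:
--             return
--         if len(x) > MAX_ALIAS_LEN:
--             x = x[:MAX_ALIAS_LEN]
--         k = x.casefold()
--         if k in seen:
--             return
--         seen.add(k)
--         out.append(x)
--
--     for a in (existing or []):
--         add(a)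
--     for a in (incoming or []):
--         add(a)
--
--     return out[:MAX_ALIASES]
-- ===== SOURCE B (Python) =====
-- MAX_ALIASES = 50
--
-- MAX_ALIAS_LEN = 120
--
-- def _merge_aliases(existing, incoming) -> list[str]:
--     def clean(xs):
--         return [a[:MAX_ALIAS_LEN] for a in ((s or "").strip() for s in (xs or [])) if a]
--     xs = clean(existing) + clean(incoming)
--     out = []
--     # selection-style dedup: repeatedly take the head, then filter every
--     # case-insensitive duplicate of it out of the remainder; no 'seen' set.
--     # Stop as soon as the cap is reached (the dropped tail could not survive [:50]).
--     while xs and len(out) < MAX_ALIASES: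
--         head = xs[0]
--         k = head.casefold()
--         out.append(head)
--         xs = [t for t in xs[1:] if t.casefold() != k]
--     return out
-- ===== Notes on version B (the rewrite author's own statement) =====
-- stated objective: alternative
-- what changed: A's single pass with a 'seen' set of casefolded keys is replaced by a normalize pass followed by selection-style dedup with no membership structure at all: repeatedly take the head and filter its case-insensitive duplicates out of the remainder, stopping once MAX_ALIASES items are collected (so no final slice).
import Mathlib
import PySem

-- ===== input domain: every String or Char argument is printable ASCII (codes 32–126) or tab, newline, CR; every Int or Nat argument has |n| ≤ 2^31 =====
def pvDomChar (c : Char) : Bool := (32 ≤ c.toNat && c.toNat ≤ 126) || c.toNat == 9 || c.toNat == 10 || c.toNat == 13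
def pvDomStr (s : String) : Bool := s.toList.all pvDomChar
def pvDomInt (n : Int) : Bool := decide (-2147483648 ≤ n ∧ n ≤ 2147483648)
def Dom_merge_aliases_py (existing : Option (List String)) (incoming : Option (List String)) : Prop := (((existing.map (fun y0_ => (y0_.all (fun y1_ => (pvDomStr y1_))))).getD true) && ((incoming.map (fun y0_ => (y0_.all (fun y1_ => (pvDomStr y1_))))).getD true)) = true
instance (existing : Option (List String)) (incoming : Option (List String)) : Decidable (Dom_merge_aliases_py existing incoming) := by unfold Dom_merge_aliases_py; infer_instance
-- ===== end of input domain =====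

-- B replaces A's seen-set single pass by a normalize pass plus selection-style dedup
-- (repeatedly keep the head and filter its case-insensitive duplicates out of the
-- remainder, stopping at the cap); return value only, neither mutates its inputs.
-- str.casefold is ported as PySem.Str.lower in BOTH ports (exact on the ASCII domain).

-- ===== PORT A =====
-- the nested 'add' closure: state is (out, seen); branches in A's order
def mergeAliasesAdd (st : List String × PySem.Set String) (x : String) :
    List String × PySem.Set String :=
  let x := PySem.Str.strip x          -- x = (x or "").strip(); '' strips to ''
  if x = "" then st
  else
    let x := if PySem.Str.len x > 120 then PySem.Str.slice x none (some 120) else x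
    let k := PySem.Str.lower x        -- k = x.casefold()
    if st.2.contains k then st
    else (st.1 ++ [x], st.2.add k)

def merge_aliases_py (existing : Option (List String)) (incoming : Option (List String)) : List String :=
  let st := (existing.getD []).foldl mergeAliasesAdd ([], PySem.Set.empty)
  let st := (incoming.getD []).foldl mergeAliasesAdd st
  PySem.List.slice st.1 none (some 50)   -- out[:MAX_ALIASES]

-- ===== PORT B =====
-- clean(xs): [a[:120] for a in ((s or "").strip() for s in (xs or [])) if a]
def cleanAliases (xs : Option (List String)) : List String :=
  ((xs.getD []).map PySem.Str.strip).filterMap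
    (fun a => if a ≠ "" then some (PySem.Str.slice a none (some 120)) else none)

-- the while loop: fuel = MAX_ALIASES - len(out); out is built head-first
def dedupLoop : Nat → List String → List String
  | _, [] => []
  | 0, _ :: _ => []
  | Nat.succ n, x :: xs =>
      x :: dedupLoop n (xs.filter (fun t => PySem.Str.lower t ≠ PySem.Str.lower x))

def merge_aliases_py_alt (existing : Option (List String)) (incoming : Option (List String)) : List String :=
  dedupLoop 50 (cleanAliases existing ++ cleanAliases incoming)

-- ===== PRECONDITION & SPEC =====
def Spec_merge_aliases_py (existing : Option (List String)) (incoming : Option (List String)) (out : List String) : Prop := out = merge_aliases_py_alt existing incoming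
instance (existing : Option (List String)) (incoming : Option (List String)) (out : List String) : Decidable (Spec_merge_aliases_py existing incoming out) := by unfold Spec_merge_aliases_py; infer_instance

-- ===== CLAIM (what is proved, stated in full; the proofs are below) =====
def Claim_equal_merge_aliases_py : Prop := ∀ (existing : Option (List String)) (incoming : Option (List String)), Dom_merge_aliases_py existing incoming → Spec_merge_aliases_py existing incoming (merge_aliases_py existing incoming)

-- ===== LEMMAS AND PROOFS =====

-- x[:120] is the identity on strings of length ≤ 120
theorem strSlice120_of_le (s : String) (h : PySem.Str.len s ≤ 120) :
    PySem.Str.slice s none (some 120) = s := by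
  have h1 : (PySem.Str.slice s none (some 120)).toList = s.toList := by
    rw [PySem.Str.toList_slice, PySem.Chars.slice_eq_listSlice,
      PySem.List.slice_to _ (by norm_num)]
    exact List.take_of_length_le (by simpa [PySem.Str.len] using h)
  exact String.toList_inj.mp h1

-- one cleaned element (B's clean per element; also what A's add works on)
def cleanOne (a : String) : Option String :=
  if PySem.Str.strip a ≠ "" then some (PySem.Str.slice (PySem.Str.strip a) none (some 120))
  else none

theorem cleanAliases_eq (xs : Option (List String)) :
    cleanAliases xs = (xs.getD []).filterMap cleanOne := by
  simp [cleanAliases, List.filterMap_map, cleanOne]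

-- unbounded selection dedup (the loop without its cap)
def dedupFull : List String → List String
  | [] => []
  | x :: xs =>
      x :: dedupFull (xs.filter (fun t => PySem.Str.lower t ≠ PySem.Str.lower x))
  termination_by l => l.length
  decreasing_by
    simp only [List.length_cons, Nat.lt_succ_iff, List.length_unattach]
    exact le_trans (List.length_filter_le _ _) (by simp)

theorem dedupFull_nil : dedupFull [] = [] := by
  rw [dedupFull.eq_def]

theorem dedupFull_cons (x : String) (xs : List String) :
    dedupFull (x :: xs)
      = x :: dedupFull (xs.filter (fun t => PySem.Str.lower t ≠ PySem.Str.lower x)) := by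
  rw [dedupFull.eq_def]

theorem take_dedupFull (n : Nat) (l : List String) :
    (dedupFull l).take n = dedupLoop n l := by
  induction n generalizing l with
  | zero => cases l <;> simp [dedupFull, dedupLoop]
  | succ n ih =>
    cases l with
    | nil => simp [dedupFull, dedupLoop]
    | cons x xs => rw [dedupFull, dedupLoop, List.take_succ_cons, ih]

-- main invariant: A's fold from state (out, seen) produces
-- out ++ (selection dedup of the cleaned elements whose key is not yet in seen)
theorem merge_aliases_invariant (l : List String)
    (out : List String) (seen : PySem.Set String) :
    (l.foldl mergeAliasesAdd (out, seen)).1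
      = out ++ dedupFull ((l.filterMap cleanOne).filter
          (fun t => !seen.contains (PySem.Str.lower t))) := by
  induction l generalizing out seen with
  | nil => simp [dedupFull_nil]
  | cons a l ih =>
    rw [List.foldl_cons, List.filterMap_cons]
    by_cases he : PySem.Str.strip a = ""
    · have hc : cleanOne a = none := by simp [cleanOne, he]
      have ha : mergeAliasesAdd (out, seen) a = (out, seen) := by
        simp [mergeAliasesAdd, he]
      rw [hc, ha, ih]
    · have hc : cleanOne a
          = some (PySem.Str.slice (PySem.Str.strip a) none (some 120)) := by
        simp [cleanOne, he]
      have hx : (if PySem.Str.len (PySem.Str.strip a) > 120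
            then PySem.Str.slice (PySem.Str.strip a) none (some 120)
            else PySem.Str.strip a)
          = PySem.Str.slice (PySem.Str.strip a) none (some 120) := by
        by_cases hl : PySem.Str.len (PySem.Str.strip a) > 120
        · rw [if_pos hl]
        · rw [if_neg hl]; exact (strSlice120_of_le _ (not_lt.mp hl)).symm
      set x := PySem.Str.slice (PySem.Str.strip a) none (some 120) with hxdef
      have ha : mergeAliasesAdd (out, seen) a =
          (if seen.contains (PySem.Str.lower x) = true then (out, seen)
           else (out ++ [x], seen.add (PySem.Str.lower x))) := by
        simp only [mergeAliasesAdd, he, ite_false]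
        rw [hx]
      rw [hc, List.filter_cons, ha]
      by_cases hmem : seen.contains (PySem.Str.lower x) = true
      · rw [if_pos hmem, if_neg (by rw [hmem]; exact Bool.false_ne_true), ih]
      · rw [Bool.not_eq_true] at hmem
        rw [if_neg (by rw [hmem]; exact Bool.false_ne_true)]
        rw [if_pos (by rw [hmem]; rfl)]
        rw [ih]
        rw [dedupFull_cons]
        rw [List.filter_filter]
        have hf : (List.filterMap cleanOne l).filter
              (fun t => !(seen.add (PySem.Str.lower x)).contains (PySem.Str.lower t))
            = (List.filterMap cleanOne l).filter
              (fun t => decide (PySem.Str.lower t ≠ PySem.Str.lower x)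
                  && !seen.contains (PySem.Str.lower t)) := by
          apply List.filter_congr
          intro t _
          rw [PySem.Set.add, hmem, if_neg (by simp)]
          simp only [PySem.Set.contains_eq_listContains, List.contains_append,
            List.contains_cons, List.contains_nil]
          cases h1 : List.contains seen (PySem.Str.lower t) <;>
            by_cases h2 : PySem.Str.lower t = PySem.Str.lower x <;>
              simp [h2]
        rw [hf, List.append_assoc, List.cons_append, List.nil_append]

-- ===== VERDICT (by name: the statement is the Claim_ definition above) =====
theorem merge_aliases_py_spec : Claim_equal_merge_aliases_py := by
  intro existing incoming _
  show merge_aliases_py existing incoming = merge_aliases_py_alt existing incoming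
  simp only [merge_aliases_py, merge_aliases_py_alt]
  rw [← List.foldl_append, merge_aliases_invariant, cleanAliases_eq, cleanAliases_eq,
    ← List.filterMap_append, List.nil_append]
  have : ∀ t, (!PySem.Set.contains PySem.Set.empty (PySem.Str.lower t)) = true := by
    intro t; simp [PySem.Set.empty]
  rw [List.filter_eq_self.mpr (fun t _ => this t),
    PySem.List.slice_to _ (by norm_num), take_dedupFull]
  rfl
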